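-- pv_equiv track=rewrite | github.com/Franck-Demongin/NX_PromptStyler | __init__.py | order_csv
-- ===== SOURCE A (Python) =====
-- def order_csv(dict_list: dict, order: list[str]) -> dict:
--     ''' Order CSV file
--     dict_list: list of dictionaries
--     order: list of keys
--     return: list of dictionaries
--     '''
--     ordered_dict = {}
--     keys_positive = dict_list.pop("positive", None)
--     keys_negative = dict_list.pop("negative", None)
--     # csv_ordered = [key for key in dict_list if key in order and key != "prompt_positive"]
--     csv_unordered = [key for key in dict_list if key not in order]
--     for key in order:
--         if key in dict_list:
--             ordered_dict[key] = dict_list[key]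
--     for key in csv_unordered:
--         ordered_dict[key] = dict_list[key]
--     if keys_positive:
--         ordered_dict["positive"] = keys_positive
--     if keys_negative:
--         ordered_dict["negative"] = keys_negative
--     return ordered_dict
-- ===== SOURCE B (Python) =====
-- def order_csv(dict_list: dict, order: list[str]) -> dict:
--     ''' Order CSV file: keys listed in `order` first (in that order), then the
--     remaining keys in insertion order, truthy "positive"/"negative" moved last.
--     Re-implementation: one stable sort of the items by a precomputed rank
--     (first index in `order`, else len(order) + position), instead of two
--     membership-scanning passes.  Pops "positive"/"negative" from dict_list
--     like the original. '''
--     keys_positive = dict_list.pop("positive", None)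
--     keys_negative = dict_list.pop("negative", None)
--     rank = {}
--     for i, k in enumerate(order):
--         rank.setdefault(k, i)
--     n = len(order)
--     middle = [kv for _, kv in sorted(enumerate(dict_list.items()),
--                                      key=lambda p: rank.get(p[1][0], n + p[0]))]
--     tail = []
--     if keys_positive:
--         tail.append(("positive", keys_positive))
--     if keys_negative:
--         tail.append(("negative", keys_negative))
--     return dict(middle + tail)
-- ===== Notes on version B (the rewrite author's own statement) =====
-- stated objective: faster
-- what changed: A's two scoped passes (an O(|dict|*|order|) 'key not in order' comprehension plus an order-membership loop inserting into a dict) are replaced by building a first-occurrence rank index of `order` once (setdefault), one stable sort of the enumerated items by rank (default len(order)+position), and a single dict() rebuild from the sorted pairs plus the truthy positive/negative tail; the pop-mutation of dict_list is kept.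
import Mathlib
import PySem

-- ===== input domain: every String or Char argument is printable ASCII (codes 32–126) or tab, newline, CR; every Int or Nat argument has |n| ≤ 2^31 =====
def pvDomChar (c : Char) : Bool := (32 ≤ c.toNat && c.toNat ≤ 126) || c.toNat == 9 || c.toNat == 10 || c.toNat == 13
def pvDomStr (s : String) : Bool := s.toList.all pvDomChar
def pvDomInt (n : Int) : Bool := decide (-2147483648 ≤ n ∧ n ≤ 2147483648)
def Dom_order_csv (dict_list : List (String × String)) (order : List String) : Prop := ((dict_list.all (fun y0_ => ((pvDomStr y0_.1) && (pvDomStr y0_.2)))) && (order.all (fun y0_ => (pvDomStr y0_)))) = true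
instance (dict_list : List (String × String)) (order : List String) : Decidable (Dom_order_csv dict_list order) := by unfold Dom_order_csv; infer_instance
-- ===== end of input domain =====

-- B replaces A's two membership-scanning passes by a first-occurrence rank index of `order`
-- plus ONE stable sort of the enumerated items and a single dict() rebuild (in Python both
-- A and B pop "positive"/"negative" out of dict_list; the equivalence proved here is about
-- the return value).

-- ===== PORT A =====
-- the two middle passes of A (helper; the rest of A is in order_csv below)
def order_csv_mid (d2 : PySem.Dict String String) (order : List String) : PySem.Dict String String :=
  let csv_unordered := d2.keys.filter (fun k => !(order.contains k))
  let od := order.foldl (fun a k => if d2.contains k then a.insert k (d2.getD k "") else a) PySem.Dict.empty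
  csv_unordered.foldl (fun a k => a.insert k (d2.getD k "")) od

def order_csv (dict_list : List (String × String)) (order : List String) : List (String × String) :=
  let d0 : PySem.Dict String String := PySem.Dict.mk dict_list
  let keys_positive := d0.get? "positive"      -- dict_list.pop("positive", None)
  let d1 := d0.erase "positive"
  let keys_negative := d1.get? "negative"      -- dict_list.pop("negative", None)
  let d2 := d1.erase "negative"
  let od := order_csv_mid d2 order
  let od1 := match keys_positive with
    | some v => if v ≠ "" then od.insert "positive" v else od
    | none => od
  let od2 := match keys_negative with
    | some v => if v ≠ "" then od1.insert "negative" v else od1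
    | none => od1
  od2.items

-- ===== PORT B =====
-- B's middle: rank := first-occurrence index of each key of `order` (setdefault loop),
-- then ONE stable sort of the enumerated remaining items by rank (default n + position)
def order_csv_alt_mid (d2 : PySem.Dict String String) (order : List String) : List (String × String) :=
  let rank : PySem.Dict String Int :=
    (PySem.List.enumerate order).foldl (fun a p => a.setdefault p.2 p.1) PySem.Dict.empty
  let n : Int := order.length
  (PySem.List.sorted (PySem.List.enumerate d2.items)
      (fun p => rank.getD p.2.1 (n + p.1)) false).map (fun p => p.2)

def order_csv_alt (dict_list : List (String × String)) (order : List String) : List (String × String) :=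
  let d0 : PySem.Dict String String := PySem.Dict.mk dict_list
  let keys_positive := d0.get? "positive"      -- dict_list.pop("positive", None)
  let d1 := d0.erase "positive"
  let keys_negative := d1.get? "negative"      -- dict_list.pop("negative", None)
  let d2 := d1.erase "negative"
  let middle := order_csv_alt_mid d2 order
  let tail : List (String × String) :=
    (match keys_positive with
      | some v => if v ≠ "" then [("positive", v)] else []
      | none => []) ++
    (match keys_negative with
      | some v => if v ≠ "" then [("negative", v)] else []
      | none => [])
  (PySem.Dict.ofList (middle ++ tail)).items    -- dict(middle + tail)

-- ===== PRECONDITION & SPEC =====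
-- Pre_ only excludes association lists with duplicate keys: those do not represent any
-- Python dict (dict construction collapses duplicates), so no input A accepts is excluded.
def Pre_order_csv (dict_list : List (String × String)) (order : List String) : Prop :=
  (dict_list.map Prod.fst).Nodup
instance (dict_list : List (String × String)) (order : List String) : Decidable (Pre_order_csv dict_list order) := by unfold Pre_order_csv; infer_instance

def pvWitness_order_csv : (List (String × String)) × List String :=
  ([("b", "1"), ("a", "2"), ("positive", "p")], ["a"])

def Spec_order_csv (dict_list : List (String × String)) (order : List String) (out : List (String × String)) : Prop := out = order_csv_alt dict_list order
instance (dict_list : List (String × String)) (order : List String) (out : List (String × String)) : Decidable (Spec_order_csv dict_list order out) := by unfold Spec_order_csv; infer_instance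

-- ===== CLAIM (what is proved, stated in full; the proofs are below) =====
def Claim_equal_order_csv : Prop := ∀ (dict_list : List (String × String)) (order : List String), Dom_order_csv dict_list order → Pre_order_csv dict_list order → Spec_order_csv dict_list order (order_csv dict_list order)

-- ===== LEMMAS AND PROOFS =====

-- the key sequence of the middle section: ordered keys first, then the unordered ones
def pvS (d2 : PySem.Dict String String) (order : List String) : List String :=
  PySem.Set.ofList (order.filter (fun k => d2.contains k))
    ++ d2.keys.filter (fun k => !(order.contains k))

theorem pvPairwiseImpMem {a : Type} {R S : a -> a -> Prop} {l : List a}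
    (h : forall x, x ∈ l -> forall y, y ∈ l -> R x y -> S x y) (hp : l.Pairwise R) :
    l.Pairwise S := by
  induction hp with
  | nil => exact .nil
  | @cons x t hhead htail ih =>
    exact .cons (fun b hb => h x (.head t) b (.tail x hb) (hhead b hb))
      (ih (fun p hp q hq => h p (.tail x hp) q (.tail x hq)))

-- inserting key k with value d2[k] into a dict of shape S0.map (k, d2[k]) is Set.add on the key list
theorem pvIns (d2 : PySem.Dict String String) (S0 : List String) (k : String) :
    (PySem.Dict.mk (S0.map (fun x => (x, d2.getD x "")))).insert k (d2.getD k "")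
      = PySem.Dict.mk ((PySem.Set.add S0 k).map (fun x => (x, d2.getD x ""))) := by
  by_cases h : k ∈ S0
  · have hc : (PySem.Dict.mk (S0.map (fun x => (x, d2.getD x "")))).contains k = true := by
      simp [PySem.Dict.contains, List.any_map, Function.comp]
      exact h
    have ha : PySem.Set.add S0 k = S0 := by
      simp [PySem.Set.add, h]
    rw [ha]
    simp only [PySem.Dict.insert]
    rw [if_pos hc]
    congr 1
    rw [List.map_map]
    apply List.map_congr_left
    intro a _
    by_cases hak : a = k
    · subst hak; simp
    · simp [Function.comp, hak]
  · have hc : (PySem.Dict.mk (S0.map (fun x => (x, d2.getD x "")))).contains k = false := by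
      simp [PySem.Dict.contains, List.any_map, Function.comp]
      intro x hx he
      exact h (he ▸ hx)
    have ha : PySem.Set.add S0 k = S0 ++ [k] := by
      simp [PySem.Set.add, h]
    rw [ha]
    simp only [PySem.Dict.insert]
    rw [if_neg (by simp [hc])]
    simp

-- A's first pass
theorem pvLoopA1 (d2 : PySem.Dict String String) (ks S0 : List String) :
    ks.foldl (fun a k => if d2.contains k then a.insert k (d2.getD k "") else a)
        (PySem.Dict.mk (S0.map (fun x => (x, d2.getD x ""))))
      = PySem.Dict.mk ((PySem.Set.update S0 (ks.filter (fun k => d2.contains k))).map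
          (fun x => (x, d2.getD x ""))) := by
  induction ks generalizing S0 with
  | nil => simp [PySem.Set.update_nil]
  | cons x t ih =>
    cases hc : d2.contains x with
    | true =>
      simp only [List.foldl_cons]
      rw [if_pos hc, pvIns, ih, List.filter_cons_of_pos hc, PySem.Set.update_cons]
    | false =>
      simp only [List.foldl_cons]
      rw [if_neg (by simp [hc]), List.filter_cons_of_neg (by simp [hc])]
      exact ih S0

-- A's second pass
theorem pvLoopA2 (d2 : PySem.Dict String String) (ks S0 : List String) :
    ks.foldl (fun a k => a.insert k (d2.getD k ""))
        (PySem.Dict.mk (S0.map (fun x => (x, d2.getD x ""))))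
      = PySem.Dict.mk ((PySem.Set.update S0 ks).map (fun x => (x, d2.getD x ""))) := by
  induction ks generalizing S0 with
  | nil => simp [PySem.Set.update_nil]
  | cons x t ih =>
    simp only [List.foldl_cons]
    rw [pvIns, ih, PySem.Set.update_cons]

-- getD after B's setdefault loop = first matching pair (or the accumulator's value)
theorem pvSetdefaultFold (ps : List (Int × String)) (acc : PySem.Dict String Int)
    (k : String) (dflt : Int) :
    (ps.foldl (fun a p => a.setdefault p.2 p.1) acc).getD k dflt
      = match ps.find? (fun p => p.2 == k) with
        | some p => if acc.contains k then acc.getD k dflt else p.1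
        | none => acc.getD k dflt := by
  induction ps generalizing acc with
  | nil => simp
  | cons p t ih =>
    simp only [List.foldl_cons, List.find?_cons]
    by_cases hpk : p.2 = k
    · have hbe : (p.2 == k) = true := by simp [hpk]
      rw [hbe]
      rw [ih]
      cases hc : acc.contains k with
      | true =>
        have hs : acc.setdefault p.2 p.1 = acc := PySem.Dict.setdefault_of_contains _ _ (hpk ▸ hc)
        rw [hs]
        cases t.find? (fun q => q.2 == k) <;> simp [hc]
      | false =>
        have hs : acc.setdefault p.2 p.1 = acc.insert p.2 p.1 :=
          PySem.Dict.setdefault_of_not_contains _ _ (hpk ▸ hc)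
        rw [hs, hpk]
        cases t.find? (fun q => q.2 == k) <;>
          simp [PySem.Dict.contains_insert_self, PySem.Dict.getD_insert_self]
    · have hbe : (p.2 == k) = false := beq_eq_false_iff_ne.mpr hpk
      rw [hbe]
      rw [ih]
      cases hc2 : acc.contains p.2 with
      | true =>
        rw [PySem.Dict.setdefault_of_contains _ _ hc2]
      | false =>
        rw [PySem.Dict.setdefault_of_not_contains _ _ hc2]
        have hck : (acc.insert p.2 p.1).contains k = acc.contains k := by
          rw [PySem.Dict.contains_insert]
          simp [beq_eq_false_iff_ne.mpr (Ne.symm hpk)]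
        have hgd : (acc.insert p.2 p.1).getD k dflt = acc.getD k dflt :=
          PySem.Dict.getD_insert_of_ne _ _ _ (Ne.symm hpk)
        cases t.find? (fun q => q.2 == k) <;> simp [hck, hgd]

-- find? over an enumeration is index?
theorem pvFindEnum (l : List String) (s : Int) (k : String) :
    (PySem.List.enumerate l s).find? (fun p => p.2 == k)
      = (PySem.List.index? l k).map (fun (i : Nat) => (s + (i : Int), k)) := by
  induction l generalizing s with
  | nil =>
    rw [PySem.List.enumerate_nil]
    rw [(PySem.List.index?_eq_none_iff ([] : List String) k).mpr (by simp)]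
    simp
  | cons x t ih =>
    rw [PySem.List.enumerate_cons]
    by_cases he : x = k
    · subst he
      rw [PySem.List.index?_cons_self]
      simp [List.find?]
    · have hbe : (x == k) = false := beq_eq_false_iff_ne.mpr he
      have h1 : (((s, x) :: PySem.List.enumerate t (s + 1)).find? (fun p => p.2 == k))
          = (PySem.List.enumerate t (s + 1)).find? (fun p => p.2 == k) := by
        simp [List.find?, hbe]
      rw [h1, ih (s + 1), PySem.List.index?_cons_of_ne _ he, Option.map_map]
      cases hi : PySem.List.index? t k with
      | none => simp
      | some i =>
        simp only [Option.map_some, Function.comp_apply, Option.some_inj, Prod.mk.injEq, and_true]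
        push_cast
        ring

-- the rank dictionary of B looks up the FIRST index of k in `order`
theorem pvRankGetD (order : List String) (k : String) (dflt : Int) :
    ((PySem.List.enumerate order).foldl (fun a p => a.setdefault p.2 p.1)
        PySem.Dict.empty).getD k dflt
      = match PySem.List.index? order k with
        | some i => (i : Int)
        | none => dflt := by
  rw [pvSetdefaultFold, pvFindEnum]
  cases hi : PySem.List.index? order k with
  | none => simp [PySem.Dict.getD_empty]
  | some i => simp

theorem pvEnumNodup (K : List String) (h : K.Nodup) :
    PySem.List.enumerate K = K.map (fun k => ((K.idxOf k : Int), k)) := by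
  apply List.ext_getElem
  · simp [PySem.List.length_enumerate]
  · intro i h1 h2
    have h3 : i < K.length := by simpa [PySem.List.length_enumerate] using h1
    rw [PySem.List.getElem_enumerate]
    rw [List.getElem_map]
    rw [h.idxOf_getElem i h3]
    simp

theorem pvEnumMap {α β : Type} (f : α → β) (l : List α) (s : Int) :
    PySem.List.enumerate (l.map f) s = (PySem.List.enumerate l s).map (fun p => (p.1, f p.2)) := by
  induction l generalizing s with
  | nil => simp [PySem.List.enumerate_nil]
  | cons x t ih => simp [PySem.List.enumerate_cons, ih]

theorem pvOfListCons (x : String) (xs : List String) :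
    PySem.Set.ofList (x :: xs) = x :: (PySem.Set.ofList xs).filter (fun y => !(x == y)) := by
  have h1 : PySem.Set.ofList (x :: xs) = PySem.Set.update [x] xs := rfl
  rw [h1, PySem.Set.update_eq_append_filter, List.singleton_append]
  congr 1
  apply List.filter_congr
  intro a _
  congr 1
  show PySem.Set.contains [x] a = (x == a)
  by_cases h : x = a
  · subst h; simp [PySem.Set.contains]
  · simp [PySem.Set.contains, h, Ne.symm h]

theorem pvOfListNodup (l : List String) (h : l.Nodup) : PySem.Set.ofList l = l := by
  induction l with
  | nil => rfl
  | cons x t ih =>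
    have hx : x ∉ t := (List.nodup_cons.mp h).1
    rw [pvOfListCons, ih (List.nodup_cons.mp h).2]
    have hf : t.filter (fun y => !(x == y)) = t := by
      apply List.filter_eq_self.mpr
      intro a ha
      have hxa : ¬ x = a := fun he => hx (by rw [he]; exact ha)
      simp [hxa]
    rw [hf]

theorem pvPairwiseIdxOfOfList (l : List String) :
    (PySem.Set.ofList l).Pairwise (fun a b => l.idxOf a < l.idxOf b) := by
  induction l with
  | nil => exact List.Pairwise.nil
  | cons x t ih =>
    rw [pvOfListCons]
    refine List.Pairwise.cons ?_ ?_
    · intro b hb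
      have hbx : x ≠ b := by
        have := (List.mem_filter.mp hb).2
        simpa using this
      rw [List.idxOf_cons_self, List.idxOf_cons_ne _ hbx]
      omega
    · have hp : ((PySem.Set.ofList t).filter (fun y => !(x == y))).Pairwise
          (fun a b => t.idxOf a < t.idxOf b) := ih.sublist List.filter_sublist
      refine pvPairwiseImpMem ?_ hp
      intro a ha b hb hlt
      have hax : x ≠ a := by
        have := (List.mem_filter.mp ha).2
        simpa using this
      have hbx : x ≠ b := by
        have := (List.mem_filter.mp hb).2
        simpa using this
      rw [List.idxOf_cons_ne _ hax, List.idxOf_cons_ne _ hbx]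
      omega

theorem pvOfListFilterSublist (l : List String) (P : String -> Bool) :
    List.Sublist (PySem.Set.ofList (l.filter P)) (PySem.Set.ofList l) := by
  induction l with
  | nil => simp
  | cons x t ih =>
    cases hP : P x with
    | true =>
      rw [List.filter_cons_of_pos hP, pvOfListCons, pvOfListCons]
      exact (List.Sublist.filter _ ih).cons₂ x
    | false =>
      rw [List.filter_cons_of_neg (by simp [hP]), pvOfListCons]
      have hself : (PySem.Set.ofList (t.filter P)).filter (fun y => !(x == y))
          = PySem.Set.ofList (t.filter P) := by
        apply List.filter_eq_self.mpr
        intro a ha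
        have ha2 : a ∈ t.filter P := (PySem.Set.mem_ofList _ _).mp ha
        have hPa : P a = true := (List.mem_filter.mp ha2).2
        have hax : ¬ x = a := fun he => by
          rw [he, hPa] at hP
          exact Bool.noConfusion hP
        simp [hax]
      rw [← hself]
      exact (List.Sublist.filter _ ih).cons x

theorem pvMapFstFilter (l : List (String × String)) (k : String) :
    (l.filter (fun p => !(p.1 == k))).map Prod.fst
      = (l.map Prod.fst).filter (fun x => !(x == k)) := by
  induction l with
  | nil => rfl
  | cons p t ih =>
    by_cases hp : p.1 == k
    · simp [hp, ih]
    · simp [hp, ih]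

theorem pvKeysErase (d : PySem.Dict String String) (k : String) :
    (d.erase k).keys = d.keys.filter (fun x => !(x == k)) := by
  obtain ⟨l⟩ := d
  simpa [PySem.Dict.erase, PySem.Dict.keys] using pvMapFstFilter l k

theorem pvIndexSomeOfMem (l : List String) (k : String) (h : k ∈ l) :
    PySem.List.index? l k = some (l.idxOf k) := by
  induction l with
  | nil => cases h
  | cons x t ih =>
    by_cases he : x = k
    · subst he
      rw [PySem.List.index?_cons_self, List.idxOf_cons_self]
    · have hkt : k ∈ t := by
        cases h with
        | head => exact absurd rfl he
        | tail _ h2 => exact h2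
      rw [PySem.List.index?_cons_of_ne _ he, ih hkt]
      simp [List.idxOf_cons_ne _ he]

theorem pvSDisj (d2 : PySem.Dict String String) (order : List String) :
    ∀ x ∈ d2.keys.filter (fun k => !(order.contains k)),
      x ∉ PySem.Set.ofList (order.filter (fun k => d2.contains k)) := by
  intro x hx hxS
  have h1 : x ∈ order.filter (fun k => d2.contains k) := (PySem.Set.mem_ofList _ _).mp hxS
  have h2 : x ∈ order := (List.mem_filter.mp h1).1
  have h3 := (List.mem_filter.mp hx).2
  simp at h3
  exact h3 h2

theorem pvSNodup (d2 : PySem.Dict String String) (order : List String) (h : d2.keys.Nodup) :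
    (pvS d2 order).Nodup := by
  exact List.Nodup.append (PySem.Set.nodup_ofList _) (h.filter _)
    (fun a ha hb => pvSDisj d2 order a hb ha)

theorem pvSPerm (d2 : PySem.Dict String String) (order : List String) (h : d2.keys.Nodup) :
    (pvS d2 order).Perm d2.keys := by
  rw [List.perm_ext_iff_of_nodup (pvSNodup d2 order h) h]
  intro a
  simp only [pvS, List.mem_append]
  constructor
  · rintro (ha | ha)
    · exact (PySem.Dict.contains_iff_mem_keys d2 a).mp
        (List.mem_filter.mp ((PySem.Set.mem_ofList _ _).mp ha)).2
    · exact (List.mem_filter.mp ha).1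
  · intro ha
    by_cases ho : a ∈ order
    · left
      exact (PySem.Set.mem_ofList _ _).mpr (List.mem_filter.mpr
        ⟨ho, (PySem.Dict.contains_iff_mem_keys d2 a).mpr ha⟩)
    · right
      refine List.mem_filter.mpr ⟨ha, ?_⟩
      simpa using ho

theorem pvSMemKeys (d2 : PySem.Dict String String) (order : List String) (x : String)
    (hx : x ∈ pvS d2 order) : x ∈ d2.keys := by
  rcases List.mem_append.mp hx with ha | ha
  · exact (PySem.Dict.contains_iff_mem_keys d2 x).mp
      (List.mem_filter.mp ((PySem.Set.mem_ofList _ _).mp ha)).2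
  · exact (List.mem_filter.mp ha).1

-- A's middle passes produce the keys pvS in order, with d2's values
theorem pvMidA (d2 : PySem.Dict String String) (order : List String) (h : d2.keys.Nodup) :
    order_csv_mid d2 order = PySem.Dict.mk ((pvS d2 order).map (fun x => (x, d2.getD x ""))) := by
  simp only [order_csv_mid, pvS]
  have e0 : (PySem.Dict.empty : PySem.Dict String String)
      = PySem.Dict.mk (([] : List String).map (fun x => (x, d2.getD x ""))) := rfl
  rw [e0, pvLoopA1, pvLoopA2, PySem.Set.update_nil_left,
    PySem.Set.update_eq_append_of_disjoint _ _ (h.filter _) (pvSDisj d2 order)]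

-- B's single stable sort produces exactly the same middle pairs
theorem pvMidB (d2 : PySem.Dict String String) (order : List String) (h : d2.keys.Nodup) :
    order_csv_alt_mid d2 order = (pvS d2 order).map (fun x => (x, d2.getD x "")) := by
  simp only [order_csv_alt_mid]
  simp only [pvRankGetD]
  rw [PySem.Dict.items_eq_map_keys d2 h "", pvEnumMap, pvEnumNodup d2.keys h, List.map_map]
  have hsorted : PySem.List.sorted
      (d2.keys.map ((fun p => (p.1, (fun k => (k, d2.getD k "")) p.2))
        ∘ (fun k => ((d2.keys.idxOf k : Int), k))))
      (fun p => match PySem.List.index? order p.2.1 with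
        | some i => (i : Int)
        | none => ((order.length : Int) + p.1)) false
      = (pvS d2 order).map (fun k => ((d2.keys.idxOf k : Int), (k, d2.getD k ""))) := by
    apply PySem.List.sorted_eq_of_perm_of_pairwise_lt
    · have hp := (pvSPerm d2 order h).map
        (fun k => ((d2.keys.idxOf k : Int), (k, d2.getD k "")))
      exact hp.trans (by
        apply List.Perm.of_eq
        apply List.map_congr_left
        intro a _
        rfl)
    · rw [List.pairwise_map]
      simp only [pvS, List.pairwise_append]
      refine ⟨?_, ?_, ?_⟩
      · have hS : (PySem.Set.ofList (order.filter (fun k => d2.contains k))).Pairwise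
            (fun a b => order.idxOf a < order.idxOf b) :=
          (pvPairwiseIdxOfOfList order).sublist
            (pvOfListFilterSublist order (fun k => d2.contains k))
        refine pvPairwiseImpMem ?_ hS
        intro a ha b hb hlt
        have ha2 : a ∈ order := (List.mem_filter.mp ((PySem.Set.mem_ofList _ _).mp ha)).1
        have hb2 : b ∈ order := (List.mem_filter.mp ((PySem.Set.mem_ofList _ _).mp hb)).1
        rw [pvIndexSomeOfMem order a ha2, pvIndexSomeOfMem order b hb2]
        show ((order.idxOf a : Nat) : Int) < ((order.idxOf b : Nat) : Int)
        exact_mod_cast hlt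
      · have hKpair : d2.keys.Pairwise (fun a b => d2.keys.idxOf a < d2.keys.idxOf b) := by
          have hk := pvPairwiseIdxOfOfList d2.keys
          rwa [pvOfListNodup _ h] at hk
        have hcsv : (d2.keys.filter (fun k => !(order.contains k))).Pairwise
            (fun a b => d2.keys.idxOf a < d2.keys.idxOf b) :=
          hKpair.sublist List.filter_sublist
        refine pvPairwiseImpMem ?_ hcsv
        intro a ha b hb hlt
        have ha2 : a ∉ order := by
          have := (List.mem_filter.mp ha).2
          simpa using this
        have hb2 : b ∉ order := by
          have := (List.mem_filter.mp hb).2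
          simpa using this
        have hna : PySem.List.index? order a = none :=
          (PySem.List.index?_eq_none_iff order a).mpr ha2
        have hnb : PySem.List.index? order b = none :=
          (PySem.List.index?_eq_none_iff order b).mpr hb2
        rw [hna, hnb]
        show ((order.length : Int) + ((d2.keys.idxOf a : Nat) : Int))
          < ((order.length : Int) + ((d2.keys.idxOf b : Nat) : Int))
        omega
      · intro a ha b hb
        have ha2 : a ∈ order := (List.mem_filter.mp ((PySem.Set.mem_ofList _ _).mp ha)).1
        have hb2 : b ∉ order := by
          have := (List.mem_filter.mp hb).2
          simpa using this
        have hlt : order.idxOf a < order.length := List.idxOf_lt_length_of_mem ha2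
        have hnb : PySem.List.index? order b = none :=
          (PySem.List.index?_eq_none_iff order b).mpr hb2
        rw [pvIndexSomeOfMem order a ha2, hnb]
        have h1 : ((order.idxOf a : Nat) : Int) < ((order.length : Nat) : Int) := by
          exact_mod_cast hlt
        have h2 : (0 : Int) ≤ ((d2.keys.idxOf b : Nat) : Int) := Int.natCast_nonneg _
        exact lt_of_lt_of_le h1 (le_add_of_nonneg_right h2)
  rw [hsorted, List.map_map]
  apply List.map_congr_left
  intro a _
  rfl

-- a dict built from pairs with a fresh key: insert appends
theorem pvContainsMkFalse (l : List (String × String)) (k : String)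
    (h : ∀ p ∈ l, p.1 ≠ k) : (PySem.Dict.mk l).contains k = false := by
  simp only [PySem.Dict.contains]
  rw [List.any_eq_false]
  intro p hp
  simpa using h p hp

theorem pvInsertAppend (l : List (String × String)) (k : String) (v : String)
    (h : ∀ p ∈ l, p.1 ≠ k) :
    (PySem.Dict.mk l).insert k v = PySem.Dict.mk (l ++ [(k, v)]) := by
  apply PySem.Dict.ext
  rw [PySem.Dict.items_insert_of_not_contains _ _ (pvContainsMkFalse l k h)]

-- dict() of an association list with distinct keys keeps it as is
theorem pvOfListItems (l : List (String × String)) (h : (l.map Prod.fst).Nodup) :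
    (PySem.Dict.ofList l).items = l := by
  have hfresh : ∀ a ∈ l, (PySem.Dict.empty : PySem.Dict String String).contains a.1 = false := by
    intro a _
    simp
  have := PySem.Dict.items_foldl_insert_fresh l Prod.fst Prod.snd PySem.Dict.empty hfresh h
  simpa [PySem.Dict.ofList, PySem.Dict.update] using this

-- ===== VERDICT (by name: the statement is the Claim_ definition above) =====
theorem order_csv_spec : Claim_equal_order_csv := by
  intro dict_list order _hDom hPre
  unfold Spec_order_csv
  simp only [order_csv, order_csv_alt]
  set d2 := (((PySem.Dict.mk dict_list).erase "positive").erase "negative") with hd2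
  have hnd : d2.keys.Nodup := by
    rw [hd2, pvKeysErase, pvKeysErase]
    exact (hPre.filter _).filter _
  have hposK : "positive" ∉ d2.keys := by
    rw [hd2, pvKeysErase, pvKeysErase]
    intro hmem
    have h2 := (List.mem_filter.mp (List.mem_filter.mp hmem).1).2
    simp at h2
  have hnegK : "negative" ∉ d2.keys := by
    rw [hd2, pvKeysErase]
    intro hmem
    have h2 := (List.mem_filter.mp hmem).2
    simp at h2
  have hpos : "positive" ∉ pvS d2 order := fun hm => hposK (pvSMemKeys d2 order _ hm)
  have hneg : "negative" ∉ pvS d2 order := fun hm => hnegK (pvSMemKeys d2 order _ hm)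
  have hSnd : (pvS d2 order).Nodup := pvSNodup d2 order hnd
  have hpos' : ∀ a ∈ pvS d2 order, ¬ a = "positive" := fun a ha he => hpos (he ▸ ha)
  have hneg' : ∀ a ∈ pvS d2 order, ¬ a = "negative" := fun a ha he => hneg (he ▸ ha)
  rw [pvMidA d2 order hnd, pvMidB d2 order hnd]
  set M := (pvS d2 order).map (fun x => (x, d2.getD x "")) with hM
  have hMfst : ∀ p ∈ M, p.1 ∈ pvS d2 order := by
    intro p hp
    rcases List.mem_map.mp hp with ⟨x, hx, he⟩
    rw [← he]
    exact hx
  have hpn : ∀ a ∈ pvS d2 order, ¬ a = "positive" ∧ ¬ a = "negative" :=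
    fun a ha => ⟨hpos' a ha, hneg' a ha⟩
  have hMpos : ∀ p ∈ M, p.1 ≠ "positive" := fun p hp => hpos' p.1 (hMfst p hp)
  have hMneg : ∀ p ∈ M, p.1 ≠ "negative" := fun p hp => hneg' p.1 (hMfst p hp)
  have hMmapfst : M.map Prod.fst = pvS d2 order := by
    rw [hM, List.map_map]
    exact (List.map_congr_left (fun x _ => rfl)).trans (List.map_id _)
  cases hkp : (PySem.Dict.mk dict_list).get? "positive" with
  | none =>
    cases hkn : ((PySem.Dict.mk dict_list).erase "positive").get? "negative" with
    | none =>
      dsimp only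
      rw [pvOfListItems] <;> simp [hMmapfst, hSnd]
    | some w =>
      dsimp only
      by_cases hw : w ≠ ""
      · rw [if_pos hw]
        rw [pvInsertAppend M "negative" w hMneg]
        rw [pvOfListItems] <;> simp [hw, List.nodup_append, hMmapfst, hSnd]
        all_goals exact hneg'
      · rw [if_neg hw]
        rw [pvOfListItems] <;> simp [hw, hMmapfst, hSnd]
  | some v =>
    dsimp only
    by_cases hv : v ≠ ""
    · rw [if_pos hv]
      rw [pvInsertAppend M "positive" v hMpos]
      cases hkn : ((PySem.Dict.mk dict_list).erase "positive").get? "negative" with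
      | none =>
        dsimp only
        rw [pvOfListItems] <;> simp [hv, List.nodup_append, hMmapfst, hSnd]
        all_goals exact hpos'
      | some w =>
        dsimp only
        by_cases hw : w ≠ ""
        · rw [if_pos hw]
          have hfr : ∀ p ∈ M ++ [("positive", v)], p.1 ≠ "negative" := by
            intro p hp
            rcases List.mem_append.mp hp with h1 | h1
            · exact hneg' p.1 (hMfst p h1)
            · rw [List.mem_singleton] at h1
              rw [h1]
              simp
          rw [pvInsertAppend (M ++ [("positive", v)]) "negative" w hfr]
          rw [pvOfListItems] <;> simp [hv, hw, List.nodup_append, hMmapfst, hSnd]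
          all_goals exact hpn
        · rw [if_neg hw]
          rw [pvOfListItems] <;> simp [hv, hw, List.nodup_append, hMmapfst, hSnd]
          all_goals exact hpos'
    · rw [if_neg hv]
      cases hkn : ((PySem.Dict.mk dict_list).erase "positive").get? "negative" with
      | none =>
        dsimp only
        rw [pvOfListItems] <;> simp [hv, hMmapfst, hSnd]
      | some w =>
        dsimp only
        by_cases hw : w ≠ ""
        · rw [if_pos hw]
          rw [pvInsertAppend M "negative" w hMneg]
          rw [pvOfListItems] <;> simp [hv, hw, List.nodup_append, hMmapfst, hSnd]
          all_goals exact hneg'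
        · rw [if_neg hw]
          rw [pvOfListItems] <;> simp [hv, hw, hMmapfst, hSnd]
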